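-- pv_equiv track=rewrite | github.com/flamenco108/plover_polish_slowik | theory-dev/wrk/spectra_lexer/wolne_klawisze.py | wybierz_klawisze
-- ===== SOURCE A (Python) =====
-- from typing import Tuple
--
-- Klw = Tuple[str, str, str]
--
-- def wybierz_klawisze(klawisze: Klw, indeksy: Tuple[int, ...]) -> Klw:
--     """Zwraca klawisze dla listy indeksów.
--
--     Parameters
--     ----------
--     klawisze : Klw
--         zbiór klawiszy do wyboru podzielony na części klawiatury
--     indeksy : Tuple[int, ...]
--         indeksy klawiszy do wyboru gdyby były niepodzielonym tekstem
--
--     Returns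
--     -------
--     Klw
--         wybrane klawisze
--     """
--     dł_l, dł_ś, dł_p = [len(s)for s in klawisze]
--     lewe = [klawisze[0][i]
--             for i in indeksy if i < dł_l]
--     środkowe = [klawisze[1][i - dł_l]
--                 for i in indeksy if dł_l <= i < (dł_l + dł_ś)]
--     prawe = [klawisze[2][i - dł_l - dł_ś]
--              for i in indeksy if i >= (dł_l + dł_ś)]
--     return tuple([''.join(s) for s in [lewe, środkowe, prawe]])
-- ===== SOURCE B (Python) =====
-- def wybierz_klawisze(klawisze, indeksy):
--     dl_l, dl_s = len(klawisze[0]), len(klawisze[1])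
--     lewe, srodkowe, prawe = [], [], []
--     for i in indeksy:
--         if i < dl_l:
--             lewe.append(klawisze[0][i])
--         elif i < dl_l + dl_s:
--             srodkowe.append(klawisze[1][i - dl_l])
--         else:
--             prawe.append(klawisze[2][i - dl_l - dl_s])
--     return (''.join(lewe), ''.join(srodkowe), ''.join(prawe))
-- ===== Notes on version B (the rewrite author's own statement) =====
-- stated objective: alternative
-- what changed: Replaces three separate filtered comprehension scans over indeksy with a single dispatched pass that routes each index to one of three accumulator lists via if/elif/else, joining each once at the end.
import Mathlib
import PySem

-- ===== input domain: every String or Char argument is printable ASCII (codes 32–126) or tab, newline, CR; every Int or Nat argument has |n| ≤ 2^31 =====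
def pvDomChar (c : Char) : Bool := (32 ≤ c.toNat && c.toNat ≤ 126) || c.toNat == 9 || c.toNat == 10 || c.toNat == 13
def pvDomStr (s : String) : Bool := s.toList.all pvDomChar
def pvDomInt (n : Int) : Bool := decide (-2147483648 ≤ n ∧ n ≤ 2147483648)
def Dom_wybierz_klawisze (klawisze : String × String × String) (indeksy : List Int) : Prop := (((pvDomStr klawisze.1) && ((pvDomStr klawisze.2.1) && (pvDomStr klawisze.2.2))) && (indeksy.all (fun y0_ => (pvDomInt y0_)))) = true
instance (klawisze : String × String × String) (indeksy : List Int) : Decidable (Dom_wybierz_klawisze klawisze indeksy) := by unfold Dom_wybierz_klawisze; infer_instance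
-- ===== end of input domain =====

-- B replaces A's three filtered scans over indeksy by one dispatched pass with three accumulators.

-- ===== PORT A =====
-- Three filtered comprehensions, each its own pass over indeksy (out-of-range indexing is an
-- IndexError in Python = a dropped `none` of pyGet? here; Pre_ excludes those inputs).
def wybierz_klawisze (klawisze : String × String × String) (indeksy : List Int) : String × String × String :=
  let dł_l : Int := klawisze.1.toList.length
  let dł_ś : Int := klawisze.2.1.toList.length
  let lewe : List Char :=
    (indeksy.filter (fun i => i < dł_l)).filterMap
      (fun i => PySem.List.pyGet? klawisze.1.toList i)
  let środkowe : List Char :=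
    (indeksy.filter (fun i => dł_l ≤ i && i < dł_l + dł_ś)).filterMap
      (fun i => PySem.List.pyGet? klawisze.2.1.toList (i - dł_l))
  let prawe : List Char :=
    (indeksy.filter (fun i => dł_l + dł_ś ≤ i)).filterMap
      (fun i => PySem.List.pyGet? klawisze.2.2.toList (i - dł_l - dł_ś))
  (String.ofList lewe, String.ofList środkowe, String.ofList prawe)

-- ===== PORT B =====
-- One fold over indeksy dispatching each index into one of three accumulators.
def wybierz_klawisze_alt (klawisze : String × String × String) (indeksy : List Int) : String × String × String :=
  let c0 := klawisze.1.toList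
  let c1 := klawisze.2.1.toList
  let c2 := klawisze.2.2.toList
  let dł_l : Int := c0.length
  let dł_ś : Int := c1.length
  let acc := indeksy.foldl
    (fun (acc : List Char × List Char × List Char) i =>
      if i < dł_l then
        (acc.1 ++ (PySem.List.pyGet? c0 i).toList, acc.2.1, acc.2.2)
      else if i < dł_l + dł_ś then
        (acc.1, acc.2.1 ++ (PySem.List.pyGet? c1 (i - dł_l)).toList, acc.2.2)
      else
        (acc.1, acc.2.1, acc.2.2 ++ (PySem.List.pyGet? c2 (i - dł_l - dł_ś)).toList))
    ([], [], [])
  (String.ofList acc.1, String.ofList acc.2.1, String.ofList acc.2.2)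

-- ===== PRECONDITION & SPEC =====
-- Pre_: every index hits an existing key — A (and B) raise IndexError exactly when some
-- i < -len(part0) or i ≥ total length.
def Pre_wybierz_klawisze (klawisze : String × String × String) (indeksy : List Int) : Prop :=
  ∀ i ∈ indeksy, -(klawisze.1.toList.length : Int) ≤ i ∧
    i < (klawisze.1.toList.length : Int) + klawisze.2.1.toList.length + klawisze.2.2.toList.length
instance (klawisze : String × String × String) (indeksy : List Int) : Decidable (Pre_wybierz_klawisze klawisze indeksy) := by unfold Pre_wybierz_klawisze; infer_instance
def pvWitness_wybierz_klawisze : (String × String × String) × List Int := (("abc", "de", "fg"), [0, 4, -1, 6, 3])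

def Spec_wybierz_klawisze (klawisze : String × String × String) (indeksy : List Int) (out : String × String × String) : Prop := out = wybierz_klawisze_alt klawisze indeksy
instance (klawisze : String × String × String) (indeksy : List Int) (out : String × String × String) : Decidable (Spec_wybierz_klawisze klawisze indeksy out) := by unfold Spec_wybierz_klawisze; infer_instance

-- ===== CLAIM (what is proved, stated in full; the proofs are below) =====
def Claim_equal_wybierz_klawisze : Prop := ∀ (klawisze : String × String × String) (indeksy : List Int), Dom_wybierz_klawisze klawisze indeksy → Pre_wybierz_klawisze klawisze indeksy → Spec_wybierz_klawisze klawisze indeksy (wybierz_klawisze klawisze indeksy)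

-- ===== LEMMAS AND PROOFS =====

-- The single dispatched pass equals the three filtered passes (for any prior accumulators).
theorem pv_loop_split (c0 c1 c2 : List Char) (dł_l dł_ś : Int) (hś : 0 ≤ dł_ś) :
    ∀ (idx : List Int) (l m p : List Char),
    idx.foldl
      (fun (acc : List Char × List Char × List Char) i =>
        if i < dł_l then
          (acc.1 ++ (PySem.List.pyGet? c0 i).toList, acc.2.1, acc.2.2)
        else if i < dł_l + dł_ś then
          (acc.1, acc.2.1 ++ (PySem.List.pyGet? c1 (i - dł_l)).toList, acc.2.2)
        else
          (acc.1, acc.2.1, acc.2.2 ++ (PySem.List.pyGet? c2 (i - dł_l - dł_ś)).toList))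
      (l, m, p)
    = (l ++ (idx.filter (fun i => i < dł_l)).filterMap (fun i => PySem.List.pyGet? c0 i),
       m ++ (idx.filter (fun i => dł_l ≤ i && i < dł_l + dł_ś)).filterMap (fun i => PySem.List.pyGet? c1 (i - dł_l)),
       p ++ (idx.filter (fun i => dł_l + dł_ś ≤ i)).filterMap (fun i => PySem.List.pyGet? c2 (i - dł_l - dł_ś))) := by
  intro idx
  induction idx with
  | nil => intro l m p; simp
  | cons i rest ih =>
      intro l m p
      simp only [List.foldl_cons, List.filter_cons]
      by_cases h1 : i < dł_l
      · have h2 : ¬ (dł_l ≤ i && i < dł_l + dł_ś) = true := by simp; omega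
        have h3 : ¬ (dł_l + dł_ś ≤ i) := by omega
        simp only [if_pos h1, ih]
        simp [h1, h2, h3, List.filterMap_cons]
        cases PySem.List.pyGet? c0 i <;> simp
      · by_cases h2 : i < dł_l + dł_ś
        · have h2' : (decide (dł_l ≤ i) && decide (i < dł_l + dł_ś)) = true := by simp; omega
          have h3 : ¬ (dł_l + dł_ś ≤ i) := by omega
          simp only [if_neg h1, if_pos h2, ih]
          simp [h1, h2', h3, List.filterMap_cons]
          cases PySem.List.pyGet? c1 (i - dł_l) <;> simp
        · have h3 : dł_l + dł_ś ≤ i := by omega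
          simp only [if_neg h1, if_neg h2, ih]
          simp [h1, h2, h3, List.filterMap_cons]
          cases PySem.List.pyGet? c2 (i - dł_l - dł_ś) <;> simp

-- ===== VERDICT (by name: the statement is the Claim_ definition above) =====
theorem wybierz_klawisze_spec : Claim_equal_wybierz_klawisze := by
  intro klawisze indeksy _ _
  unfold Spec_wybierz_klawisze
  dsimp only [wybierz_klawisze, wybierz_klawisze_alt]
  rw [pv_loop_split klawisze.1.toList klawisze.2.1.toList klawisze.2.2.toList _ _ (by positivity)]
  simp
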